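-- pv_equiv track=rewrite | github.com/ClementinoKing/Funding-Scrapper-v2 | scraper/utils/document_reader.py | infer_document_kind
-- ===== SOURCE A (Python) =====
-- from typing import List, Optional, Tuple
--
-- DOCUMENT_KIND_PDF = "pdf"
--
-- DOCUMENT_KIND_DOCX = "docx"
--
-- DOCUMENT_KIND_XLSX = "xlsx"
--
-- DOCUMENT_KIND_IMAGE = "image"
--
-- DOCUMENT_KIND_TEXT = "text"
--
-- DOCUMENT_KIND_UNSUPPORTED = "unsupported"
--
-- DOCUMENT_IMAGE_EXTENSIONS = (".png", ".jpg", ".jpeg", ".gif", ".webp", ".bmp", ".tif", ".tiff")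
--
-- PDF_CONTENT_TYPES = (
--     "application/pdf",
--     "application/x-pdf",
-- )
--
-- DOCX_CONTENT_TYPES = (
--     "application/vnd.openxmlformats-officedocument.wordprocessingml.document",
-- )
--
-- XLSX_CONTENT_TYPES = (
--     "application/vnd.openxmlformats-officedocument.spreadsheetml.sheet",
--     "application/vnd.ms-excel",
-- )
--
-- IMAGE_CONTENT_PREFIXES = ("image/",)
--
-- TEXT_CONTENT_PREFIXES = ("text/", "application/xml", "application/xhtml+xml")
--
-- def infer_document_kind(url: str, content_type: Optional[str] = None) -> str:
--     lowered_url = (url or "").lower()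
--     lowered_content_type = (content_type or "").lower()
--
--     if lowered_content_type.startswith(IMAGE_CONTENT_PREFIXES) or any(lowered_url.endswith(ext) for ext in DOCUMENT_IMAGE_EXTENSIONS):
--         return DOCUMENT_KIND_IMAGE
--     if lowered_content_type.startswith(PDF_CONTENT_TYPES) or lowered_url.endswith(".pdf"):
--         return DOCUMENT_KIND_PDF
--     if lowered_content_type.startswith(DOCX_CONTENT_TYPES) or lowered_url.endswith(".docx"):
--         return DOCUMENT_KIND_DOCX
--     if lowered_content_type.startswith(XLSX_CONTENT_TYPES) or lowered_url.endswith(".xlsx"):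
--         return DOCUMENT_KIND_XLSX
--     if lowered_content_type.startswith(TEXT_CONTENT_PREFIXES):
--         return DOCUMENT_KIND_TEXT
--     if lowered_url.endswith(".doc") or lowered_url.endswith(".xls") or lowered_url.endswith(".ppt") or lowered_url.endswith(".pptx"):
--         return DOCUMENT_KIND_UNSUPPORTED
--     return DOCUMENT_KIND_UNSUPPORTED
-- ===== SOURCE B (Python) =====
-- # Two independent classifications (content-type -> kind, url extension -> kind),
-- # each a first-match scan over a priority-ordered map, combined by rank; A's
-- # interleaved branch chain disappears.
-- _CT_KINDS = [
--     ("image/", "image"),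
--     ("application/pdf", "pdf"),
--     ("application/x-pdf", "pdf"),
--     ("application/vnd.openxmlformats-officedocument.wordprocessingml.document", "docx"),
--     ("application/vnd.openxmlformats-officedocument.spreadsheetml.sheet", "xlsx"),
--     ("application/vnd.ms-excel", "xlsx"),
--     ("text/", "text"),
--     ("application/xml", "text"),
--     ("application/xhtml+xml", "text"),
-- ]
--
-- _EXT_KINDS = [
--     (".png", "image"), (".jpg", "image"), (".jpeg", "image"), (".gif", "image"),
--     (".webp", "image"), (".bmp", "image"), (".tif", "image"), (".tiff", "image"),
--     (".pdf", "pdf"),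
--     (".docx", "docx"),
--     (".xlsx", "xlsx"),
-- ]
--
-- _RANK = {"image": 0, "pdf": 1, "docx": 2, "xlsx": 3, "text": 4, "unsupported": 5}
--
-- def infer_document_kind(url, content_type=None):
--     lowered_url = (url or "").lower()
--     lowered_content_type = (content_type or "").lower()
--     ct_kind = next((k for p, k in _CT_KINDS if lowered_content_type.startswith(p)), "unsupported")
--     ext_kind = next((k for e, k in _EXT_KINDS if lowered_url.endswith(e)), "unsupported")
--     return ext_kind if _RANK[ext_kind] < _RANK[ct_kind] else ct_kind
-- ===== Notes on version B (the rewrite author's own statement) =====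
-- stated objective: alternative
-- what changed: Instead of A's interleaved priority branch chain, B classifies the content type and the URL extension independently (each a first-match scan of its own priority-ordered map) and combines the two kinds by a rank table, dropping the redundant .doc/.xls/.ppt/.pptx branch.
import Mathlib
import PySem

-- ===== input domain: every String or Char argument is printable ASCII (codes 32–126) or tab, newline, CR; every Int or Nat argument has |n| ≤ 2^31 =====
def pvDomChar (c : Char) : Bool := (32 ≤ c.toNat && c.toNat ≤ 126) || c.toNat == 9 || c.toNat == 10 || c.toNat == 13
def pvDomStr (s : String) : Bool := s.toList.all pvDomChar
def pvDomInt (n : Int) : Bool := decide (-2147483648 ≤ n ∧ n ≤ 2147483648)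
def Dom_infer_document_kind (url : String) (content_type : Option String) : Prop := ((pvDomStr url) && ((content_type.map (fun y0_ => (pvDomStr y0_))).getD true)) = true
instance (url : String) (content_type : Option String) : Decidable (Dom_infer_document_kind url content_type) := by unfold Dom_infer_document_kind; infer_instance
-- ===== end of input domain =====

-- B classifies content type and URL extension independently and combines the two kinds by rank, replacing A's interleaved branch chain (alternative; same cost).

-- ===== PORT A =====
def DOCUMENT_IMAGE_EXTENSIONS : List String := [".png", ".jpg", ".jpeg", ".gif", ".webp", ".bmp", ".tif", ".tiff"]
def PDF_CONTENT_TYPES : List String := ["application/pdf", "application/x-pdf"]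
def DOCX_CONTENT_TYPES : List String := ["application/vnd.openxmlformats-officedocument.wordprocessingml.document"]
def XLSX_CONTENT_TYPES : List String := ["application/vnd.openxmlformats-officedocument.spreadsheetml.sheet", "application/vnd.ms-excel"]
def IMAGE_CONTENT_PREFIXES : List String := ["image/"]
def TEXT_CONTENT_PREFIXES : List String := ["text/", "application/xml", "application/xhtml+xml"]

def infer_document_kind (url : String) (content_type : Option String) : String :=
  let lowered_url := PySem.Str.lower (if url == "" then "" else url)
  let lowered_content_type := PySem.Str.lower
    (match content_type with
     | none => ""
     | some s => if s == "" then "" else s)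
  if IMAGE_CONTENT_PREFIXES.any (fun p => PySem.Str.startswith lowered_content_type p)
     || DOCUMENT_IMAGE_EXTENSIONS.any (fun ext => PySem.Str.endswith lowered_url ext) then "image"
  else if PDF_CONTENT_TYPES.any (fun p => PySem.Str.startswith lowered_content_type p)
     || PySem.Str.endswith lowered_url ".pdf" then "pdf"
  else if DOCX_CONTENT_TYPES.any (fun p => PySem.Str.startswith lowered_content_type p)
     || PySem.Str.endswith lowered_url ".docx" then "docx"
  else if XLSX_CONTENT_TYPES.any (fun p => PySem.Str.startswith lowered_content_type p)
     || PySem.Str.endswith lowered_url ".xlsx" then "xlsx"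
  else if TEXT_CONTENT_PREFIXES.any (fun p => PySem.Str.startswith lowered_content_type p) then "text"
  else if PySem.Str.endswith lowered_url ".doc" || PySem.Str.endswith lowered_url ".xls"
       || PySem.Str.endswith lowered_url ".ppt" || PySem.Str.endswith lowered_url ".pptx" then "unsupported"
  else "unsupported"

-- ===== PORT B =====
def pvCtKinds : List (String × String) :=
  [ ("image/", "image"),
    ("application/pdf", "pdf"),
    ("application/x-pdf", "pdf"),
    ("application/vnd.openxmlformats-officedocument.wordprocessingml.document", "docx"),
    ("application/vnd.openxmlformats-officedocument.spreadsheetml.sheet", "xlsx"),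
    ("application/vnd.ms-excel", "xlsx"),
    ("text/", "text"),
    ("application/xml", "text"),
    ("application/xhtml+xml", "text") ]

def pvExtKinds : List (String × String) :=
  [ (".png", "image"), (".jpg", "image"), (".jpeg", "image"), (".gif", "image"),
    (".webp", "image"), (".bmp", "image"), (".tif", "image"), (".tiff", "image"),
    (".pdf", "pdf"),
    (".docx", "docx"),
    (".xlsx", "xlsx") ]

def pvRank : PySem.Dict String Int :=
  PySem.Dict.ofList [("image", 0), ("pdf", 1), ("docx", 2), ("xlsx", 3), ("text", 4), ("unsupported", 5)]

-- next((k for p, k in map if pred(p)), "unsupported"): first-match scan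
def pvScan (pred : String → Bool) : List (String × String) → String
  | [] => "unsupported"
  | (p, k) :: rest => if pred p then k else pvScan pred rest

-- _RANK[k]: all kinds produced by the scans are keys of pvRank, so getD's default is unreachable
def pvRankOf (k : String) : Int := PySem.Dict.getD pvRank k 0

def infer_document_kind_alt (url : String) (content_type : Option String) : String :=
  let lowered_url := PySem.Str.lower (if url == "" then "" else url)
  let lowered_content_type := PySem.Str.lower
    (match content_type with
     | none => ""
     | some s => if s == "" then "" else s)
  let ct_kind := pvScan (fun p => PySem.Str.startswith lowered_content_type p) pvCtKinds
  let ext_kind := pvScan (fun e => PySem.Str.endswith lowered_url e) pvExtKinds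
  if pvRankOf ext_kind < pvRankOf ct_kind then ext_kind else ct_kind

-- ===== PRECONDITION & SPEC =====
def Spec_infer_document_kind (url : String) (content_type : Option String) (out : String) : Prop := out = infer_document_kind_alt url content_type
instance (url : String) (content_type : Option String) (out : String) : Decidable (Spec_infer_document_kind url content_type out) := by unfold Spec_infer_document_kind; infer_instance

-- ===== CLAIM (what is proved, stated in full; the proofs are below) =====
def Claim_equal_infer_document_kind : Prop := ∀ (url : String) (content_type : Option String), Dom_infer_document_kind url content_type → Spec_infer_document_kind url content_type (infer_document_kind url content_type)

-- ===== LEMMAS AND PROOFS =====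

-- merge adjacent branches returning the same value
theorem pv_group_ite (a b : Bool) (x y : String) :
    (if a then x else if b then x else y) = (if (a || b) then x else y) := by
  cases a <;> cases b <;> simp

-- the propositional core: first matching kind in priority order = rank-min of the two scans
theorem pv_master (C1 C2 C3 C4 C5 E1 E2 E3 E4 : Bool) :
    (if C1 || E1 then "image"
     else if C2 || E2 then "pdf"
     else if C3 || E3 then "docx"
     else if C4 || E4 then "xlsx"
     else if C5 then "text"
     else "unsupported" : String)
    = (let ck : String := if C1 then "image" else if C2 then "pdf" else if C3 then "docx"
                          else if C4 then "xlsx" else if C5 then "text" else "unsupported"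
       let ek : String := if E1 then "image" else if E2 then "pdf" else if E3 then "docx"
                          else if E4 then "xlsx" else "unsupported"
       if pvRankOf ek < pvRankOf ck then ek else ck) := by
  cases C1 <;> cases C2 <;> cases C3 <;> cases C4 <;> cases C5 <;>
    cases E1 <;> cases E2 <;> cases E3 <;> cases E4 <;> decide

-- ===== VERDICT (by name: the statement is the Claim_ definition above) =====
theorem infer_document_kind_spec : Claim_equal_infer_document_kind := by
  intro url content_type _
  unfold Spec_infer_document_kind infer_document_kind infer_document_kind_alt
  simp only [pvScan, pvCtKinds, pvExtKinds, IMAGE_CONTENT_PREFIXES, DOCUMENT_IMAGE_EXTENSIONS,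
    PDF_CONTENT_TYPES, DOCX_CONTENT_TYPES, XLSX_CONTENT_TYPES, TEXT_CONTENT_PREFIXES,
    List.any_cons, List.any_nil, Bool.or_false, ite_self, pv_group_ite]
  exact pv_master _ _ _ _ _ _ _ _ _
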